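-- pv_equiv track=rewrite | github.com/HomelessChicken78/ITS-Esercizi | Python 1-4/Recupero_e_Potenziamento/ex_03/frazione.py | max_in_two
-- ===== SOURCE A (Python) =====
-- def max_in_two(nums_1: list[int], nums_2: list[int]) -> int:
--     '''Given two lists, return the highest number that is shared among both of them.
--     If no number is found, return False.'''
--
--     # Calculate the maximum of each list individually
--     tmp_nums_1: list[int] = nums_1[:]
--     tmp_nums_2: list[int] = nums_2[:]
--
--     while tmp_nums_1 and tmp_nums_2:
--         max_1: int = max(tmp_nums_1)
--         max_2: int = max(tmp_nums_2)
--
--         # Calculate the highest number in both lists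
--         absolute_max: int = max((max_1, max_2))
--
--         # If the absolute maximum is present in both, it means the absolute maximum is shared. Therefore, return it
--         if absolute_max in nums_1 and absolute_max in nums_2:
--             return absolute_max
--
--         # If that's not the case try both max individually
--         if max_1 in nums_2:
--             return max_1
--
--         if max_2 in nums_1:
--             return max_2
--
--         # If no condition is met repeat, but before doing that remove items from the list
--         tmp_nums_1.remove(max_1)
--         tmp_nums_2.remove(max_2)
--
--     return False
-- ===== SOURCE B (Python) =====
-- def max_in_two(nums_1: list[int], nums_2: list[int]) -> int:
--     '''Given two lists, return the highest number that is shared among both of them.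
--     If no number is found, return False.'''
--     a = sorted(nums_1, reverse=True)
--     b = sorted(nums_2, reverse=True)
--     i = 0
--     j = 0
--     while i < len(a) and j < len(b):
--         if a[i] == b[j]:
--             return a[i]
--         if a[i] > b[j]:
--             i += 1
--         else:
--             j += 1
--     return False
-- ===== Notes on version B (the rewrite author's own statement) =====
-- stated objective: faster
-- what changed: Replaces the repeated max/membership/remove passes over shrinking list copies with a sort of each list followed by a single two-pointer descending merge that stops at the first (hence largest) common value. Pre_ excludes inputs with no shared value, where A returns the bool False rather than an int.
-- outside the precondition, e.g. on max_in_two([], []): A returns False, B returns False; on max_in_two([1, 2], [3]): A returns False, B returns False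
import Mathlib
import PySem

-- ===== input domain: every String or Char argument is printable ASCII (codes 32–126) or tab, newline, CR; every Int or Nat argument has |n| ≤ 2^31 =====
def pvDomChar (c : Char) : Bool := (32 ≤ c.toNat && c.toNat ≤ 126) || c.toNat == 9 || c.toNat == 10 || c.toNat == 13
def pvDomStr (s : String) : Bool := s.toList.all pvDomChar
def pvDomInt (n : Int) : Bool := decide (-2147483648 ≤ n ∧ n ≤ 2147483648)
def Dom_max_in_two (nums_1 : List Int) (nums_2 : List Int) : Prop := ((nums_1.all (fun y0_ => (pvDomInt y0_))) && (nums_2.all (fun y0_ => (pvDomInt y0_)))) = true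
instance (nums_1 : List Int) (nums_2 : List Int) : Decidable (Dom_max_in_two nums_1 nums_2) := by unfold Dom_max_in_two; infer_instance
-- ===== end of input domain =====

-- B replaces A's repeated max/membership/remove rounds by sorting both lists descending
-- and doing one two-pointer merge that stops at the first (= largest) common value (faster).
-- Python's `False` return is ported as the Int 0 (False == 0 in Python).

-- ===== PORT A =====
-- membership of max(xs): needed by the loop's termination (remove of the max shrinks the list)
theorem pv_foldl_max_mem (a : Int) (as : List Int) : as.foldl max a ∈ a :: as :=
  PySem.List.max?_mem (PySem.List.max?_id_cons a as)

-- the `while tmp_nums_1 and tmp_nums_2:` loop; nums_1/nums_2 are the original lists.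
-- max(tmp) on a nonempty list a :: as is as.foldl max a (PySem.List.max?_id_cons);
-- tmp.remove(max) removes the first occurrence = List.erase (PySem.List.remove?_eq_some_erase).
def pvLoopA (nums_1 nums_2 : List Int) : List Int → List Int → Int
  | [], _ => 0
  | _ :: _, [] => 0
  | a :: as, b :: bs =>
    let max_1 := as.foldl max a
    let max_2 := bs.foldl max b
    let absolute_max := max max_1 max_2
    if absolute_max ∈ nums_1 ∧ absolute_max ∈ nums_2 then absolute_max
    else if max_1 ∈ nums_2 then max_1
    else if max_2 ∈ nums_1 then max_2
    else pvLoopA nums_1 nums_2 ((a :: as).erase max_1) ((b :: bs).erase max_2)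
  termination_by t1 _ => t1.length
  decreasing_by
    simpa [List.length_erase_of_mem (pv_foldl_max_mem a as)] using
      Nat.lt_succ_self (a :: as).length.pred

def max_in_two (nums_1 : List Int) (nums_2 : List Int) : Int :=
  -- tmp_nums_1 = nums_1[:], tmp_nums_2 = nums_2[:]
  pvLoopA nums_1 nums_2 nums_1 nums_2

-- ===== PORT B =====
-- the index walk over the two descending-sorted lists; advancing i/j = dropping the head
def pvMerge : List Int → List Int → Int
  | a :: as, b :: bs =>
    if a = b then a
    else if a > b then pvMerge as (b :: bs)
    else pvMerge (a :: as) bs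
  | _, _ => 0

def max_in_two_alt (nums_1 : List Int) (nums_2 : List Int) : Int :=
  pvMerge (PySem.List.sorted nums_1 (fun v => v) true)
          (PySem.List.sorted nums_2 (fun v => v) true)

-- ===== PRECONDITION & SPEC =====
-- Pre_ excludes exactly the inputs with no value shared by the two lists: there A
-- returns the bool False, which is not a value of the declared return type int.
def Pre_max_in_two (nums_1 : List Int) (nums_2 : List Int) : Prop :=
  ∃ v ∈ nums_1, v ∈ nums_2
instance (nums_1 : List Int) (nums_2 : List Int) : Decidable (Pre_max_in_two nums_1 nums_2) := by unfold Pre_max_in_two; infer_instance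
def pvWitness_max_in_two : List Int × List Int := ([3, 1], [1, 2])

def Spec_max_in_two (nums_1 : List Int) (nums_2 : List Int) (out : Int) : Prop := out = max_in_two_alt nums_1 nums_2
instance (nums_1 : List Int) (nums_2 : List Int) (out : Int) : Decidable (Spec_max_in_two nums_1 nums_2 out) := by unfold Spec_max_in_two; infer_instance

-- ===== CLAIM (what is proved, stated in full; the proofs are below) =====
def Claim_equal_max_in_two : Prop := ∀ (nums_1 : List Int) (nums_2 : List Int), Dom_max_in_two nums_1 nums_2 → Pre_max_in_two nums_1 nums_2 → Spec_max_in_two nums_1 nums_2 (max_in_two nums_1 nums_2)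

-- ===== LEMMAS AND PROOFS =====

-- functional characterisation: r is the maximum value shared by x and y, or 0 with nothing shared
def pvOut (x y : List Int) (r : Int) : Prop :=
  (r ∈ x ∧ r ∈ y ∧ ∀ v, v ∈ x → v ∈ y → v ≤ r) ∨ (r = 0 ∧ ∀ v, v ∈ x → v ∉ y)

theorem pvOut_unique {x y : List Int} {r r' : Int}
    (h : pvOut x y r) (h' : pvOut x y r') : r = r' := by
  rcases h with ⟨hr1, hr2, hmax⟩ | ⟨hz, hno⟩ <;>
    rcases h' with ⟨hr1', hr2', hmax'⟩ | ⟨hz', hno'⟩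
  · exact le_antisymm (hmax' r hr1 hr2) (hmax r' hr1' hr2')
  · exact absurd hr2 (hno' r hr1)
  · exact absurd hr2' (hno r' hr1')
  · rw [hz, hz']

-- pvOut only depends on the lists through membership
theorem pvOut_congr {x x' y y' : List Int} {r : Int}
    (hx : ∀ v : Int, v ∈ x ↔ v ∈ x') (hy : ∀ v : Int, v ∈ y ↔ v ∈ y')
    (h : pvOut x' y' r) : pvOut x y r := by
  rcases h with ⟨h1, h2, h3⟩ | ⟨h1, h2⟩
  · exact Or.inl ⟨(hx r).2 h1, (hy r).2 h2, fun v hv hv' => h3 v ((hx v).1 hv) ((hy v).1 hv')⟩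
  · exact Or.inr ⟨h1, fun v hv hv' => h2 v ((hx v).1 hv) ((hy v).1 hv')⟩

-- A's loop returns the maximum shared value, given the invariants:
-- every shared value is still present in both tmp lists, and the tmp lists hold only
-- elements of the originals.  (strong induction on the length of tmp1)
theorem pvLoopA_out_aux (x y : List Int) :
    ∀ n : Nat, ∀ t1 t2 : List Int, t1.length ≤ n →
      (∀ v, v ∈ x → v ∈ y → v ∈ t1) → (∀ v, v ∈ x → v ∈ y → v ∈ t2) →
      (∀ v, v ∈ t1 → v ∈ x) → (∀ v, v ∈ t2 → v ∈ y) →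
      pvOut x y (pvLoopA x y t1 t2) := by
  intro n
  induction n with
  | zero =>
    intro t1 t2 hlen h1 _ _ _
    have ht : t1 = [] := List.length_eq_zero_iff.1 (Nat.le_zero.1 hlen)
    subst ht
    exact Or.inr ⟨by rw [pvLoopA], fun v hv hv' => by simpa using h1 v hv hv'⟩
  | succ n ih =>
    intro t1 t2 hlen h1 h2 hs1 hs2
    cases t1 with
    | nil =>
      exact Or.inr ⟨by rw [pvLoopA], fun v hv hv' => by simpa using h1 v hv hv'⟩
    | cons a as =>
    cases t2 with
    | nil =>
      exact Or.inr ⟨by rw [pvLoopA], fun v hv hv' => by simpa using h2 v hv hv'⟩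
    | cons b bs =>
      have hm1 : as.foldl max a ∈ a :: as := pv_foldl_max_mem a as
      have hm2 : bs.foldl max b ∈ b :: bs := pv_foldl_max_mem b bs
      have hle1 : ∀ v ∈ a :: as, v ≤ as.foldl max a := by
        intro v hv
        rcases List.mem_cons.1 hv with rfl | hv
        · exact (PySem.List.le_foldl_max as v).1
        · exact (PySem.List.le_foldl_max as a).2 v hv
      have hle2 : ∀ v ∈ b :: bs, v ≤ bs.foldl max b := by
        intro v hv
        rcases List.mem_cons.1 hv with rfl | hv
        · exact (PySem.List.le_foldl_max bs v).1
        · exact (PySem.List.le_foldl_max bs b).2 v hv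
      by_cases hA : max (as.foldl max a) (bs.foldl max b) ∈ x ∧
                    max (as.foldl max a) (bs.foldl max b) ∈ y
      · rw [show pvLoopA x y (a :: as) (b :: bs) = max (as.foldl max a) (bs.foldl max b) by
          rw [pvLoopA]; simp [hA]]
        exact Or.inl ⟨hA.1, hA.2, fun v hv hv' =>
          le_trans (hle1 v (h1 v hv hv')) (le_max_left _ _)⟩
      · by_cases hB : as.foldl max a ∈ y
        · rw [show pvLoopA x y (a :: as) (b :: bs) = as.foldl max a by
            rw [pvLoopA]; simp [hA, hB]]
          exact Or.inl ⟨hs1 _ hm1, hB, fun v hv hv' => hle1 v (h1 v hv hv')⟩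
        · by_cases hC : bs.foldl max b ∈ x
          · rw [show pvLoopA x y (a :: as) (b :: bs) = bs.foldl max b by
              rw [pvLoopA]; simp [hA, hB, hC]]
            exact Or.inl ⟨hC, hs2 _ hm2, fun v hv hv' => hle2 v (h2 v hv hv')⟩
          · rw [show pvLoopA x y (a :: as) (b :: bs)
                = pvLoopA x y ((a :: as).erase (as.foldl max a))
                              ((b :: bs).erase (bs.foldl max b)) by
              rw [pvLoopA]; simp [hA, hB, hC]]
            refine ih _ _ ?_ ?_ ?_ ?_ ?_
            · have := List.length_erase_of_mem hm1
              simp only [this]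
              simpa using Nat.le_of_succ_le_succ hlen
            · intro v hv hv'
              exact (List.mem_erase_of_ne (fun h => hB (by rwa [← h]))).2 (h1 v hv hv')
            · intro v hv hv'
              exact (List.mem_erase_of_ne (fun h => hC (by rwa [← h]))).2 (h2 v hv hv')
            · intro v hv; exact hs1 v (List.mem_of_mem_erase hv)
            · intro v hv; exact hs2 v (List.mem_of_mem_erase hv)

theorem pvA_out (x y : List Int) : pvOut x y (max_in_two x y) := by
  unfold max_in_two
  exact pvLoopA_out_aux x y x.length x y le_rfl (fun v hv _ => hv) (fun v _ hv => hv)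
    (fun v hv => hv) (fun v hv => hv)

-- B's merge returns the maximum shared value of two descending-sorted lists
theorem pvMerge_out :
    ∀ a b : List Int, a.Pairwise (fun p q => q ≤ p) → b.Pairwise (fun p q => q ≤ p) →
      pvOut a b (pvMerge a b) := by
  intro a b
  induction a, b using pvMerge.induct with
  | case1 as b bs =>
    intro ha hb
    rw [show pvMerge (b :: as) (b :: bs) = b by rw [pvMerge]; simp]
    refine Or.inl ⟨List.mem_cons_self, List.mem_cons_self, ?_⟩
    intro v hv _
    rcases List.mem_cons.1 hv with rfl | hv
    · exact le_refl v
    · exact (List.pairwise_cons.1 ha).1 v hv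
  | case2 a as b bs hne hgt ih =>
    intro ha hb
    rw [show pvMerge (a :: as) (b :: bs) = pvMerge as (b :: bs) by
      rw [pvMerge]; simp [hne, hgt]]
    have hnb : a ∉ b :: bs := by
      intro h
      rcases List.mem_cons.1 h with rfl | h
      · exact hne rfl
      · exact absurd ((List.pairwise_cons.1 hb).1 a h) (by omega)
    rcases ih (List.pairwise_cons.1 ha).2 hb with ⟨h1, h2, h3⟩ | ⟨h1, h2⟩
    · exact Or.inl ⟨List.mem_cons_of_mem a h1, h2, fun v hv hv' => by
        rcases List.mem_cons.1 hv with rfl | hv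
        · exact absurd hv' hnb
        · exact h3 v hv hv'⟩
    · exact Or.inr ⟨h1, fun v hv hv' => by
        rcases List.mem_cons.1 hv with rfl | hv
        · exact hnb hv'
        · exact h2 v hv hv'⟩
  | case3 a as b bs hne hgt ih =>
    intro ha hb
    rw [show pvMerge (a :: as) (b :: bs) = pvMerge (a :: as) bs by
      rw [pvMerge]; simp [hne, hgt]]
    have hna : b ∉ a :: as := by
      intro h
      rcases List.mem_cons.1 h with rfl | h
      · exact hne rfl
      · exact absurd ((List.pairwise_cons.1 ha).1 b h) (by omega)
    rcases ih ha (List.pairwise_cons.1 hb).2 with ⟨h1, h2, h3⟩ | ⟨h1, h2⟩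
    · exact Or.inl ⟨h1, List.mem_cons_of_mem b h2, fun v hv hv' => by
        rcases List.mem_cons.1 hv' with rfl | hv'
        · exact absurd hv hna
        · exact h3 v hv hv'⟩
    · exact Or.inr ⟨h1, fun v hv hv' => by
        rcases List.mem_cons.1 hv' with rfl | hv'
        · exact hna hv
        · exact h2 v hv hv'⟩
  | case4 a b h =>
    intro _ _
    match a, b with
    | [], t => exact Or.inr ⟨by rw [pvMerge.eq_def], fun v hv _ => by simp at hv⟩
    | a0 :: as, [] => exact Or.inr ⟨by rw [pvMerge.eq_def], fun v _ hv' => by simp at hv'⟩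
    | a0 :: as, b0 :: bs => exact absurd rfl (fun hh => h a0 as b0 bs hh rfl)

theorem pvB_out (x y : List Int) : pvOut x y (max_in_two_alt x y) := by
  unfold max_in_two_alt
  refine pvOut_congr (fun v => (PySem.List.mem_sorted x (fun v : Int => v) true v).symm)
    (fun v => (PySem.List.mem_sorted y (fun v : Int => v) true v).symm) ?_
  exact pvMerge_out _ _ (PySem.List.sorted_pairwise_rev x (fun v : Int => v)) (PySem.List.sorted_pairwise_rev y (fun v : Int => v))

-- ===== VERDICT (by name: the statement is the Claim_ definition above) =====
theorem max_in_two_spec : Claim_equal_max_in_two := by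
  intro x y _ _
  exact pvOut_unique (pvA_out x y) (pvB_out x y)
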